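-- pv_equiv track=rewrite | github.com/harfbuzz/harfbuzz | util/gpu/gen-default-texts.py | stringize
-- ===== SOURCE A (Python) =====
-- def stringize(varname, text):
--     """Convert text to a C string literal."""
--     lines = text.split('\n')
--     parts = ['static const char *{} =\n'.format(varname)]
--     for line in lines:
--         line = line.replace('\\', '\\\\').replace('"', '\\"')
--         parts.append('"{}\\n"\n'.format(line))
--     parts.append(';\n')
--     return ''.join(parts)
-- ===== SOURCE B (Python) =====
-- def stringize(varname, text):
--     """Convert text to a C string literal."""
--     esc = text.replace('\\', '\\\\').replace('"', '\\"')
--     body = esc.replace('\n', '\\n"\n"')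
--     return 'static const char *{} =\n"{}\\n"\n;\n'.format(varname, body)
-- ===== Notes on version B (the rewrite author's own statement) =====
-- stated objective: simpler
-- what changed: Replaces A's split-into-lines loop that escapes and wraps each line and joins a parts list with three whole-string replaces: escape backslashes and quotes once over the entire text, then replace each newline with the '\n"\n"' line-delimiter boilerplate, and assemble header + body + terminator in one format string.
import Mathlib
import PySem

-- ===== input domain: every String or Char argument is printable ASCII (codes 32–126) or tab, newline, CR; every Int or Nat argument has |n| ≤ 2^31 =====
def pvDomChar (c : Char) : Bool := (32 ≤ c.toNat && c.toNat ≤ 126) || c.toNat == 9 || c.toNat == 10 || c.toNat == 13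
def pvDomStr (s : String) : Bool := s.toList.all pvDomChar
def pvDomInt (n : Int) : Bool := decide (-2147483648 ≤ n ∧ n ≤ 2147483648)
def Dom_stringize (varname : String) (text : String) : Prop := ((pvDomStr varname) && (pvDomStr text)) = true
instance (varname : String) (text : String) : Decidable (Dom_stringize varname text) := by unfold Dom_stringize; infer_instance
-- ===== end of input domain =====

-- B escapes the whole text once and splices the line-delimiter boilerplate at each
-- newline, replacing A's per-line split/escape/append loop (objective: simpler).

-- ===== PORT A =====
def stringize (varname : String) (text : String) : String :=
  let lines := PySem.Chars.splitOn text.toList ['\n']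
  let parts : List (List Char) :=
    lines.foldl (fun ps line =>
      let line := PySem.Chars.replace (PySem.Chars.replace line ['\\'] ['\\', '\\']) ['\"'] ['\\', '\"']
      ps ++ [['\"'] ++ line ++ ['\\', 'n', '\"', '\n']])
      ["static const char *".toList ++ varname.toList ++ " =\n".toList]
  String.ofList (PySem.Chars.join [] (parts ++ [[';', '\n']]))

-- ===== PORT B =====
def stringize_alt (varname : String) (text : String) : String :=
  let esc := PySem.Chars.replace (PySem.Chars.replace text.toList ['\\'] ['\\', '\\']) ['\"'] ['\\', '\"']
  let body := PySem.Chars.replace esc ['\n'] ['\\', 'n', '\"', '\n', '\"']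
  String.ofList ("static const char *".toList ++ varname.toList ++ " =\n\"".toList ++ body ++ "\\n\"\n;\n".toList)

-- ===== PRECONDITION & SPEC =====
def Spec_stringize (varname : String) (text : String) (out : String) : Prop := out = stringize_alt varname text
instance (varname : String) (text : String) (out : String) : Decidable (Spec_stringize varname text out) := by unfold Spec_stringize; infer_instance

-- ===== CLAIM (what is proved, stated in full; the proofs are below) =====
def Claim_equal_stringize : Prop := ∀ (varname : String) (text : String), Dom_stringize varname text → Spec_stringize varname text (stringize varname text)

-- ===== LEMMAS AND PROOFS =====

-- per-character escaping of backslash and double quote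
def escChar (c : Char) : List Char :=
  if c = '\\' then ['\\', '\\'] else if c = '\"' then ['\\', '\"'] else [c]

-- single-char-pattern replace is a flatMap
theorem replace_go_single (a : Char) (new : List Char) :
    ∀ (fuel : Nat) (l acc : List Char), l.length ≤ fuel →
      PySem.Chars.replace.go [a] new fuel l acc
        = acc.reverse ++ l.flatMap (fun c => if c = a then new else [c]) := by
  intro fuel
  induction fuel with
  | zero =>
    intro l acc h
    have : l = [] := List.eq_nil_of_length_eq_zero (Nat.le_zero.mp h)
    subst this
    simp [PySem.Chars.replace.go]
  | succ n ih =>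
    intro l acc h
    cases l with
    | nil => simp [PySem.Chars.replace.go]
    | cons c t =>
      by_cases hc : c = a
      · subst hc
        have hp : [c].isPrefixOf (c :: t) = true := by simp [List.isPrefixOf]
        simp only [PySem.Chars.replace.go, hp, if_pos]
        rw [ih]
        · simp
        · simpa using Nat.le_of_succ_le_succ h
      · have hp : [a].isPrefixOf (c :: t) = false := by
          simp [List.isPrefixOf]
          exact fun hh => absurd hh.symm hc
        simp only [PySem.Chars.replace.go]
        rw [if_neg (by simp [hp])]
        rw [ih]
        · simp [hc]
        · exact Nat.le_of_succ_le_succ h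
      
theorem replace_single (s : List Char) (a : Char) (new : List Char) :
    PySem.Chars.replace s [a] new = s.flatMap (fun c => if c = a then new else [c]) := by
  unfold PySem.Chars.replace
  rw [if_neg (by simp)]
  simpa using replace_go_single a new s.length s [] (le_refl _)

-- PySem's splitOn on a single-char separator is Mathlib's splitOnP
theorem splitOn_go_single (a : Char) :
    ∀ (fuel : Nat) (l cur : List Char) (accs : List (List Char)), l.length < fuel →
      PySem.Chars.splitOn.go [a] fuel l cur accs
        = accs.reverse ++ (match List.splitOnP (· == a) l with
            | h :: t => (cur.reverse ++ h) :: t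
            | [] => []) := by
  intro fuel
  induction fuel with
  | zero => intro l cur accs h; omega
  | succ n ih =>
    intro l cur accs h
    cases l with
    | nil => simp [PySem.Chars.splitOn.go, List.splitOnP_nil]
    | cons c t =>
      by_cases hc : c = a
      · subst hc
        have hp : [c].isPrefixOf (c :: t) = true := by simp [List.isPrefixOf]
        simp only [PySem.Chars.splitOn.go, hp, if_pos, List.length_cons, List.drop_succ_cons, List.drop_zero, List.length_nil, Nat.zero_add]
        rw [ih t [] (cur.reverse :: accs) (by simpa using Nat.lt_of_succ_lt_succ h)]
        rw [List.splitOnP_cons]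
        simp only [beq_self_eq_true, if_pos]
        cases h' : List.splitOnP (· == c) t with
        | nil => exact absurd h' (List.splitOnP_ne_nil _ t)
        | cons hh tt => simp
      · have hp : [a].isPrefixOf (c :: t) = false := by
          simp [List.isPrefixOf]
          exact fun hh => absurd hh.symm hc
        simp only [PySem.Chars.splitOn.go]
        rw [if_neg (by simp [hp])]
        rw [ih t (c :: cur) accs (Nat.lt_of_succ_lt_succ h)]
        rw [List.splitOnP_cons]
        have : ((c : Char) == a) = false := by simp [hc]
        rw [this]
        simp only [Bool.false_eq_true, if_neg, not_false_iff]
        cases h' : List.splitOnP (· == a) t with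
        | nil => exact absurd h' (List.splitOnP_ne_nil _ t)
        | cons hh tt => simp

theorem splitOn_single (s : List Char) (a : Char) :
    PySem.Chars.splitOn s [a] = List.splitOnP (· == a) s := by
  unfold PySem.Chars.splitOn
  rw [splitOn_go_single a (s.length + 1) s [] [] (Nat.lt_succ_self _)]
  cases h' : List.splitOnP (· == a) s with
  | nil => exact absurd h' (List.splitOnP_ne_nil _ s)
  | cons hh tt => simp

-- the two escape replaces compose into one flatMap of escChar
theorem esc_flatMap (l : List Char) :
    (l.flatMap (fun c => if c = '\\' then ['\\', '\\'] else [c])).flatMap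
        (fun c => if c = '\"' then ['\\', '\"'] else [c])
      = l.flatMap escChar := by
  rw [List.flatMap_assoc]
  apply List.flatMap_congr
  intro c _
  by_cases h1 : c = '\\'
  · subst h1; simp [escChar]
  · by_cases h2 : c = '\"'
    · subst h2; simp [escChar]
    · simp [h1, h2, escChar]

-- escaping then splicing newlines is one flatMap
def spliceChar (c : Char) : List Char :=
  if c = '\n' then ['\\', 'n', '\"', '\n', '\"'] else escChar c

theorem splice_flatMap (l : List Char) :
    (l.flatMap escChar).flatMap (fun c => if c = '\n' then ['\\', 'n', '\"', '\n', '\"'] else [c])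
      = l.flatMap spliceChar := by
  rw [List.flatMap_assoc]
  apply List.flatMap_congr
  intro c _
  by_cases h1 : c = '\\'
  · subst h1; simp [escChar, spliceChar]
  · by_cases h2 : c = '\"'
    · subst h2; simp [escChar, spliceChar]
    · by_cases h3 : c = '\n'
      · subst h3; simp [escChar, spliceChar]
      · simp [escChar, spliceChar, h1, h2, h3]

-- the key identity: B's spliced body, quoted and terminated, is A's per-line assembly
theorem main_identity (cs : List Char) :
    '\"' :: (cs.flatMap spliceChar ++ ['\\', 'n', '\"', '\n'])
      = (List.splitOnP (· == '\n') cs).flatMap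
          (fun l => '\"' :: (l.flatMap escChar ++ ['\\', 'n', '\"', '\n'])) := by
  induction cs with
  | nil => simp [List.splitOnP_nil]
  | cons c t ih =>
    rw [List.splitOnP_cons]
    by_cases hc : c = '\n'
    · subst hc
      simp only [beq_self_eq_true, if_pos, List.flatMap_cons]
      rw [← ih]
      simp [spliceChar]
    · have hb : ((c : Char) == '\n') = false := by simp [hc]
      rw [hb]
      simp only [Bool.false_eq_true, if_neg, not_false_iff]
      cases h' : List.splitOnP (· == '\n') t with
      | nil => exact absurd h' (List.splitOnP_ne_nil _ t)
      | cons l0 rest =>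
        rw [h'] at ih
        have hs : spliceChar c = escChar c := by simp [spliceChar, hc]
        have ih2 := congrArg List.tail ih
        simp only [List.flatMap_cons, List.cons_append, List.tail_cons, List.append_assoc] at ih2
        simp only [List.modifyHead, List.flatMap_cons, hs, List.cons_append, List.append_assoc,
          List.cons.injEq, true_and]
        rw [ih2]

-- A's append-only foldl is init ++ map
theorem foldl_append_map {α β : Type} (l : List α) (g : α → β) (init : List β) :
    l.foldl (fun ps x => ps ++ [g x]) init = init ++ l.map g := by
  induction l generalizing init with
  | nil => simp
  | cons x t ih => simp [List.foldl_cons, ih]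

-- ''.join is flatten
theorem join_nil_flatten (parts : List (List Char)) :
    PySem.Chars.join [] parts = parts.flatten := by
  unfold PySem.Chars.join
  induction parts with
  | nil => simp [List.intercalate]
  | cons p t ih =>
    cases t with
    | nil => simp [List.intercalate]
    | cons q tt =>
      simp only [List.intercalate, List.intersperse] at *
      simp_all

-- ===== VERDICT (by name: the statement is the Claim_ definition above) =====
theorem stringize_spec : Claim_equal_stringize := by
  intro varname text _
  unfold Spec_stringize stringize stringize_alt
  simp only [replace_single, esc_flatMap, splice_flatMap]
  congr 1
  rw [join_nil_flatten, splitOn_single, foldl_append_map]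
  simp only [List.flatten_append, List.flatten_cons, List.flatten_nil, List.append_nil]
  rw [← List.flatMap_def]
  have hm := main_identity text.toList
  simp only [List.nil_append, List.cons_append, List.append_assoc] at hm ⊢
  rw [← hm]
  have h1 : (" =\n\"" : String).toList = (" =\n" : String).toList ++ ['\"'] := by rfl
  have h2 : ("\\n\"\n;\n" : String).toList = ['\\', 'n', '\"', '\n', ';', '\n'] := by rfl
  simp [h1, h2, List.append_assoc]
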